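-- pv_equiv track=rewrite | github.com/microsoft/mu | DocBuild.py | MakeFriendly
-- ===== SOURCE A (Python) =====
-- def MakeFriendly(string):
--     string = string.replace("_", " ").strip()  # strip snake case
--     string = ' '.join(string.split())  # strip duplicate spaces
--
--     # Handle camel case
--     newstring = ""
--     prev_char_lowercase = False
--     for i in string:
--         if(not prev_char_lowercase):
--             newstring += i
--         else:
--             if(i.isupper()):
--                 newstring += " " + i
--             else:
--                 newstring += i
--         prev_char_lowercase = i.islower()
--
--     return newstring
-- ===== SOURCE B (Python) =====
-- def MakeFriendly(string):
--     # Single pass: fuse underscore/whitespace collapsing and camelCase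
--     # splitting into one scan with a pending-separator flag.
--     out = []
--     pending = False
--     prev_lower = False
--     for ch in string:
--         if ch == '_' or ch.isspace():
--             pending = True
--             prev_lower = False
--         else:
--             if pending and out:
--                 out.append(' ')
--             pending = False
--             if prev_lower and ch.isupper():
--                 out.append(' ')
--             out.append(ch)
--             prev_lower = ch.islower()
--     return ''.join(out)
-- ===== Notes on version B (the rewrite author's own statement) =====
-- stated objective: alternative
-- what changed: Replaces A's four-phase pipeline (replace underscores, strip, split/join to collapse whitespace, then a second camelCase pass) with a single character-by-character scan maintaining a pending-separator flag and a previous-char-lowercase flag.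
import Mathlib
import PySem

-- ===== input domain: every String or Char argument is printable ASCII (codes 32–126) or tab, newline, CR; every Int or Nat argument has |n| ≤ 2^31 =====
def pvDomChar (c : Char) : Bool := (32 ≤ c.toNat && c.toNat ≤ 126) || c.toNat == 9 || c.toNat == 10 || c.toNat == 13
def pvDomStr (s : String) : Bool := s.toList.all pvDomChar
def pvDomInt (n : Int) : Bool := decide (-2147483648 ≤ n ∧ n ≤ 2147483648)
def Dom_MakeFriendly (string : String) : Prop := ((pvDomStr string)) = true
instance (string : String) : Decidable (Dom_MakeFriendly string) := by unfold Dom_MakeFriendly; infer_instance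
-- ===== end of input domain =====

-- B fuses A's replace/strip/split-join/camel phases into one character scan; alternative decomposition, same O(n) cost.


-- ===== PORT A =====
-- body of A's camel-case loop: newstring += i, or " " + i after a lowercase char before an uppercase one
def pvStepA (st : List Char × Bool) (i : Char) : List Char × Bool :=
  if !st.2 then (st.1 ++ [i], PySem.Chars.islower i)
  else if PySem.Chars.isupper i then (st.1 ++ [' ', i], PySem.Chars.islower i)
  else (st.1 ++ [i], PySem.Chars.islower i)

-- string.replace("_", " ").strip(); ' '.join(string.split()); then the camel-case loop.
def MakeFriendly (string : String) : String :=
  let s1 : List Char := PySem.Chars.replace string.toList ['_'] [' ']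
  let s2 : List Char := PySem.Chars.strip s1
  let s3 : List Char := PySem.Chars.join [' '] (PySem.Chars.split₀ s2)
  let r : List Char × Bool := s3.foldl pvStepA ([], false)
  String.mk r.1

-- ===== PORT B =====
-- body of B's single scan: state = (output chars, pending-separator flag, previous-char-lowercase flag)
def pvStepB (st : List Char × Bool × Bool) (ch : Char) : List Char × Bool × Bool :=
  if ch == '_' || PySem.Chars.isspace ch then (st.1, true, false)
  else
    let out1 := if st.2.1 && !st.1.isEmpty then st.1 ++ [' '] else st.1
    let out2 := if st.2.2 && PySem.Chars.isupper ch then out1 ++ [' ', ch] else out1 ++ [ch]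
    (out2, false, PySem.Chars.islower ch)

def MakeFriendly_alt (string : String) : String :=
  let r : List Char × Bool × Bool := string.toList.foldl pvStepB ([], false, false)
  String.mk r.1

-- ===== PRECONDITION & SPEC =====
def Spec_MakeFriendly (string : String) (out : String) : Prop := out = MakeFriendly_alt string
instance (string : String) (out : String) : Decidable (Spec_MakeFriendly string out) := by unfold Spec_MakeFriendly; infer_instance

-- ===== CLAIM (what is proved, stated in full; the proofs are below) =====
def Claim_equal_MakeFriendly : Prop := ∀ (string : String), Dom_MakeFriendly string → Spec_MakeFriendly string (MakeFriendly string)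

-- ===== LEMMAS AND PROOFS =====

-- separator characters of B ('_' or Python whitespace)
def pvSep (c : Char) : Bool := c == '_' || PySem.Chars.isspace c

-- underscore-to-space substitution performed by A's replace
def pvRepl (c : Char) : Char := if c = '_' then ' ' else c

-- words of the input: maximal runs of non-separator chars, `cur` the (reversed) current run
def pvWords : List Char → List Char → List (List Char)
  | cur, [] => if cur.isEmpty then [] else [cur.reverse]
  | cur, c :: t =>
    if pvSep c then (if cur.isEmpty then pvWords [] t else cur.reverse :: pvWords [] t)
    else pvWords (c :: cur) t

-- A's camel-case loop as a pure recursion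
def pvCamel : List Char → Bool → List Char
  | [], _ => []
  | c :: t, prev => (if prev && PySem.Chars.isupper c then [' ', c] else [c]) ++ pvCamel t (PySem.Chars.islower c)

-- B's loop as a pure recursion on the remaining input (pend, prev, out-nonempty)
def pvM : List Char → Bool → Bool → Bool → List Char
  | [], _, _, _ => []
  | c :: t, pend, prev, ne =>
    if pvSep c then pvM t true false ne
    else (if pend && ne then [' '] else []) ++
         (if prev && PySem.Chars.isupper c then [' ', c] else [c]) ++
         pvM t false (PySem.Chars.islower c) true

-- the common normal form: optional leading space, camelised first word, then space-prefixed camelised words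
def pvG (sp prev : Bool) : List (List Char) → List Char
  | [] => []
  | w :: ws => (if sp then [' '] else []) ++ pvCamel w prev ++ (ws.map (fun v => ' ' :: pvCamel v false)).flatten

def pvHeadSep : List Char → Bool
  | [] => false
  | c :: _ => pvSep c

theorem pvRepl_go (fuel : Nat) (l acc : List Char) (h : l.length ≤ fuel) :
    PySem.Chars.replace.go ['_'] [' '] fuel l acc = acc.reverse ++ l.map pvRepl := by
  induction fuel generalizing l acc with
  | zero =>
    cases l with
    | nil => simp [PySem.Chars.replace.go]
    | cons c t => simp at h
  | succ n ih =>
    cases l with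
    | nil => simp [PySem.Chars.replace.go]
    | cons c t =>
      simp only [PySem.Chars.replace.go]
      by_cases hc : c = '_'
      · subst hc
        have hp : List.isPrefixOf ['_'] ('_' :: t) = true := by simp [List.isPrefixOf]
        rw [hp]
        simp only [if_pos rfl]
        rw [ih _ _ (by simpa using Nat.le_of_succ_le_succ (by simpa using h))]
        simp [pvRepl]
      · have hp : List.isPrefixOf ['_'] (c :: t) = false := by
          simp [List.isPrefixOf, Ne.symm hc]
        rw [hp]
        simp only [Bool.false_eq_true, if_false]
        rw [ih _ _ (by simpa using Nat.le_of_succ_le_succ (by simpa using h))]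
        simp [pvRepl, hc]

theorem pvReplace_eq (cs : List Char) :
    PySem.Chars.replace cs ['_'] [' '] = cs.map pvRepl := by
  simp only [PySem.Chars.replace]
  rw [if_neg (by simp)]
  exact pvRepl_go cs.length cs [] le_rfl

theorem pvIsspace_repl (c : Char) : PySem.Chars.isspace (pvRepl c) = pvSep c := by
  by_cases hc : c = '_'
  · subst hc; simp [pvRepl, pvSep]; decide
  · simp only [pvRepl, hc, if_false, pvSep]
    have : (c == '_') = false := by simp [hc]
    rw [this]; simp

theorem pvGo_allspace (ws : List Char) (cur : List Char) (acc : List (List Char))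
    (h : ws.all PySem.Chars.isspace) :
    PySem.Chars.split₀.go ws cur acc =
      if cur.isEmpty then acc.reverse else (cur.reverse :: acc).reverse := by
  induction ws generalizing cur acc with
  | nil => simp [PySem.Chars.split₀.go]
  | cons c t ih =>
    simp only [List.all_cons, Bool.and_eq_true] at h
    simp only [PySem.Chars.split₀.go, h.1, if_pos rfl]
    by_cases hc : cur.isEmpty
    · simp only [hc, if_pos rfl]
      rw [ih _ _ h.2]; simp
    · simp only [hc]
      simp only [Bool.false_eq_true, if_false]
      rw [ih _ _ h.2]; simp

theorem pvGo_append_ws (x ws : List Char) (cur : List Char) (acc : List (List Char))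
    (h : ws.all PySem.Chars.isspace) :
    PySem.Chars.split₀.go (x ++ ws) cur acc = PySem.Chars.split₀.go x cur acc := by
  induction x generalizing cur acc with
  | nil =>
    simp only [List.nil_append]
    rw [pvGo_allspace ws cur acc h]
    simp [PySem.Chars.split₀.go]
  | cons c t ih =>
    simp only [List.cons_append, PySem.Chars.split₀.go]
    by_cases hs : PySem.Chars.isspace c
    · simp only [hs, if_pos rfl]
      by_cases hc : cur.isEmpty
      · simp only [hc, if_pos rfl]; exact ih _ _
      · simp only [hc, Bool.false_eq_true, if_false]; exact ih _ _
    · simp only [hs, Bool.false_eq_true, if_false]; exact ih _ _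

theorem pvGo_lstrip (x : List Char) (acc : List (List Char)) :
    PySem.Chars.split₀.go (List.dropWhile PySem.Chars.isspace x) [] acc =
      PySem.Chars.split₀.go x [] acc := by
  induction x generalizing acc with
  | nil => simp
  | cons c t ih =>
    by_cases hs : PySem.Chars.isspace c
    · rw [List.dropWhile_cons_of_pos hs]
      rw [ih]
      conv_rhs => simp only [PySem.Chars.split₀.go, hs, if_pos rfl]
      simp
    · rw [List.dropWhile_cons_of_neg (by simp [hs])]

theorem pvSplit_strip (x : List Char) :
    PySem.Chars.split₀ (PySem.Chars.strip x) = PySem.Chars.split₀ x := by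
  simp only [PySem.Chars.strip, PySem.Chars.lstrip, PySem.Chars.rstrip, PySem.Chars.split₀]
  set z := List.dropWhile PySem.Chars.isspace x with hz
  have hsplit : z = (List.dropWhile PySem.Chars.isspace z.reverse).reverse ++
      (List.takeWhile PySem.Chars.isspace z.reverse).reverse := by
    have h := List.takeWhile_append_dropWhile (p := PySem.Chars.isspace) (l := z.reverse)
    have h2 := congrArg List.reverse h
    simp only [List.reverse_append, List.reverse_reverse] at h2
    exact h2.symm
  have hall : (List.takeWhile PySem.Chars.isspace z.reverse).reverse.all PySem.Chars.isspace := by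
    simp only [List.all_reverse]
    exact List.all_takeWhile
  calc PySem.Chars.split₀.go (List.dropWhile PySem.Chars.isspace z.reverse).reverse [] []
      = PySem.Chars.split₀.go ((List.dropWhile PySem.Chars.isspace z.reverse).reverse ++
          (List.takeWhile PySem.Chars.isspace z.reverse).reverse) [] [] := by
        rw [pvGo_append_ws _ _ _ _ hall]
    _ = PySem.Chars.split₀.go z [] [] := by rw [← hsplit]
    _ = PySem.Chars.split₀.go x [] [] := by rw [hz, pvGo_lstrip]

theorem pvGo_words (cs : List Char) (cur : List Char) (acc : List (List Char)) :
    PySem.Chars.split₀.go (cs.map pvRepl) cur acc = acc.reverse ++ pvWords cur cs := by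
  induction cs generalizing cur acc with
  | nil =>
    simp only [List.map_nil, PySem.Chars.split₀.go, pvWords]
    by_cases hc : cur.isEmpty
    · simp [hc]
    · simp [hc]
  | cons c t ih =>
    simp only [List.map_cons, PySem.Chars.split₀.go, pvIsspace_repl, pvWords]
    by_cases hs : pvSep c
    · by_cases hc : cur.isEmpty
      · simp [hs, hc, ih]
      · simp [hs, hc, ih]
    · have hrc : pvRepl c = c := by
        have : ¬ c = '_' := by
          intro h; subst h; simp [pvSep] at hs
        simp [pvRepl, this]
      simp only [hs, Bool.false_eq_true, if_false]
      rw [hrc, ih]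

theorem pvWords_cons (cs : List Char) (cur : List Char) (h : cur ≠ []) :
    pvWords cur cs = (cur.reverse ++ List.takeWhile (fun c => !pvSep c) cs) ::
      pvWords [] (List.dropWhile (fun c => !pvSep c) cs) := by
  induction cs generalizing cur with
  | nil => simp [pvWords, h]
  | cons c t ih =>
    by_cases hs : pvSep c
    · have hcur : cur.isEmpty = false := by simp [List.isEmpty_iff, h]
      simp [pvWords, hs, hcur]
    · simp only [pvWords, hs, Bool.false_eq_true, if_false]
      rw [ih (c :: cur) (by simp)]
      simp [List.takeWhile_cons, List.dropWhile_cons, hs]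

theorem pvCamel_append (x y : List Char) (p : Bool) :
    pvCamel (x ++ y) p = pvCamel x p ++ pvCamel y (x.foldl (fun _ c => PySem.Chars.islower c) p) := by
  induction x generalizing p with
  | nil => simp [pvCamel]
  | cons c t ih => simp [pvCamel, ih]

theorem pvCamel_sp (r : List Char) (p : Bool) : pvCamel (' ' :: r) p = ' ' :: pvCamel r false := by
  have h1 : PySem.Chars.isupper ' ' = false := by decide
  have h2 : PySem.Chars.islower ' ' = false := by decide
  simp [pvCamel, h1, h2]

theorem pvCamel_join (ws : List (List Char)) :
    pvCamel (PySem.Chars.join [' '] ws) false = pvG false false ws := by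
  cases ws with
  | nil => simp [PySem.Chars.join, List.intercalate, pvCamel, pvG]
  | cons w vs =>
    induction vs generalizing w with
    | nil => simp [PySem.Chars.join, List.intercalate, pvG]
    | cons v vs ih =>
      have hjoin : PySem.Chars.join [' '] (w :: v :: vs) =
          w ++ ' ' :: PySem.Chars.join [' '] (v :: vs) := by
        simp [PySem.Chars.join, List.intercalate, List.intersperse]
      rw [hjoin, pvCamel_append, pvCamel_sp, ih v]
      simp [pvG]

theorem pvFoldA (s : List Char) (acc : List Char) (prev : Bool) :
    (s.foldl pvStepA (acc, prev)).1 = acc ++ pvCamel s prev := by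
  induction s generalizing acc prev with
  | nil => simp [pvCamel]
  | cons c t ih =>
    rw [List.foldl_cons]
    cases prev with
    | false =>
      have hstep : pvStepA (acc, false) c = (acc ++ [c], PySem.Chars.islower c) := by
        simp [pvStepA]
      rw [hstep, ih]
      simp [pvCamel]
    | true =>
      by_cases hu : PySem.Chars.isupper c
      · have hstep : pvStepA (acc, true) c = (acc ++ [' ', c], PySem.Chars.islower c) := by
          simp [pvStepA, hu]
        rw [hstep, ih]
        simp [pvCamel, hu]
      · have hstep : pvStepA (acc, true) c = (acc ++ [c], PySem.Chars.islower c) := by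
          simp [pvStepA, hu]
        rw [hstep, ih]
        simp [pvCamel, hu]

theorem pvFoldB (cs : List Char) (out : List Char) (pend prev : Bool) :
    (cs.foldl pvStepB (out, pend, prev)).1 = out ++ pvM cs pend prev (!out.isEmpty) := by
  induction cs generalizing out pend prev with
  | nil => simp [pvM]
  | cons c t ih =>
    rw [List.foldl_cons]
    by_cases hs : pvSep c
    · have hstep : pvStepB (out, pend, prev) c = (out, true, false) := by
        have hcond : (c == '_' || PySem.Chars.isspace c) = true := by simpa [pvSep] using hs
        simp [pvStepB, hcond]
      rw [hstep, ih]
      simp [pvM, hs]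
    · have hcond : (c == '_' || PySem.Chars.isspace c) = false := by
        simpa [pvSep] using hs
      have hstep : pvStepB (out, pend, prev) c =
          ((if pend && !out.isEmpty then out ++ [' '] else out) ++
             (if prev && PySem.Chars.isupper c then [' ', c] else [c]),
           false, PySem.Chars.islower c) := by
        simp only [pvStepB, hcond, Bool.false_eq_true, if_false]
        by_cases h1 : pend && !out.isEmpty
        · by_cases h2 : prev && PySem.Chars.isupper c
          · simp [h1, h2]
          · simp [h1, h2]
        · by_cases h2 : prev && PySem.Chars.isupper c
          · simp [h1, h2]
          · simp [h1, h2]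
      rw [hstep, ih]
      have hne : (!((if pend && !out.isEmpty then out ++ [' '] else out) ++
          (if prev && PySem.Chars.isupper c then [' ', c] else [c])).isEmpty) = true := by
        by_cases h2 : prev && PySem.Chars.isupper c
        · simp [h2]
        · simp [h2]
      rw [hne]
      simp only [pvM, hs, Bool.false_eq_true, if_false]
      by_cases h1 : pend && !out.isEmpty
      · by_cases h2 : prev && PySem.Chars.isupper c
        · simp [h1, h2]
        · simp [h1, h2]
      · by_cases h2 : prev && PySem.Chars.isupper c
        · simp [h1, h2]
        · simp [h1, h2]

theorem pvJ (cs : List Char) (pend prev ne : Bool) :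
    pvM cs pend prev ne =
      pvG (ne && (pend || pvHeadSep cs)) (if pvHeadSep cs then false else prev) (pvWords [] cs) := by
  induction cs generalizing pend prev ne with
  | nil => simp [pvM, pvWords, pvG, pvHeadSep]
  | cons c t ih =>
    by_cases hs : pvSep c
    · simp only [pvM, hs, if_pos rfl]
      rw [ih]
      have hw : pvWords [] (c :: t) = pvWords [] t := by simp [pvWords, hs]
      have hh : pvHeadSep (c :: t) = true := by simp [pvHeadSep, hs]
      rw [hw, hh]
      simp only [Bool.true_or, Bool.or_true, if_pos rfl]
      cases hht : pvHeadSep t <;> simp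
    · have hh : pvHeadSep (c :: t) = false := by simp [pvHeadSep, hs]
      simp only [pvM, hs, Bool.false_eq_true, if_false, hh, Bool.or_false]
      rw [ih false (PySem.Chars.islower c) true]
      have hw : pvWords [] (c :: t) = pvWords [c] t := by simp [pvWords, hs]
      rw [hw, pvWords_cons t [c] (by simp)]
      cases t with
      | nil =>
        simp [pvWords, pvG, pvCamel, pvHeadSep, Bool.and_comm]
      | cons d t' =>
        by_cases hd : pvSep d
        · have hhd : pvHeadSep (d :: t') = true := by simp [pvHeadSep, hd]
          have htk : List.takeWhile (fun c => !pvSep c) (d :: t') = [] := by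
            simp [List.takeWhile_cons, hd]
          have hdr : List.dropWhile (fun c => !pvSep c) (d :: t') = d :: t' := by
            simp [List.dropWhile_cons, hd]
          rw [htk, hdr]
          cases hpw : pvWords [] (d :: t') <;> simp [hhd, hpw, pvG, pvCamel, Bool.and_comm]
        · have hhd : pvHeadSep (d :: t') = false := by simp [pvHeadSep, hd]
          have hw2 : pvWords [] (d :: t') = pvWords [d] t' := by simp [pvWords, hd]
          rw [hw2, pvWords_cons t' [d] (by simp)]
          have htk : List.takeWhile (fun c => !pvSep c) (d :: t') =
              d :: List.takeWhile (fun c => !pvSep c) t' := by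
            simp [List.takeWhile_cons, hd]
          have hdr : List.dropWhile (fun c => !pvSep c) (d :: t') =
              List.dropWhile (fun c => !pvSep c) t' := by
            simp [List.dropWhile_cons, hd]
          rw [htk, hdr]
          simp [hhd, pvG, pvCamel, Bool.and_comm]

-- ===== VERDICT (by name: the statement is the Claim_ definition above) =====
theorem MakeFriendly_spec : Claim_equal_MakeFriendly := by
  intro s _
  unfold Spec_MakeFriendly MakeFriendly MakeFriendly_alt
  simp only []
  rw [pvFoldA, pvFoldB]
  simp only [List.nil_append, List.isEmpty_nil, Bool.not_true]
  congr 1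
  rw [pvReplace_eq, pvSplit_strip]
  simp only [PySem.Chars.split₀]
  rw [pvGo_words]
  simp only [List.reverse_nil, List.nil_append]
  rw [pvCamel_join, pvJ]
  cases hht : pvHeadSep s.toList <;> simp
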